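-- pv_equiv track=rewrite | github.com/Bookworm2012/Kyros-RPG | game/classes/player.py | validate_save_code
-- ===== SOURCE A (Python) =====
-- import string
--
-- def validate_save_code(code: str) -> bool:
--     """Basic structural validation of a save code."""
--     parts = code.split("-")
--     if len(parts) != 8:
--         return False
--     random_seq = parts[7]
--     if len(random_seq) != 6:
--         return False
--     has_upper  = any(c in string.ascii_uppercase for c in random_seq)
--     has_lower  = any(c in string.ascii_lowercase for c in random_seq)
--     has_digit  = any(c in string.digits for c in random_seq)
--     has_symbol = any(c in "}[&#(%" for c in random_seq)
--     return all([has_upper, has_lower, has_digit, has_symbol])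
-- ===== SOURCE B (Python) =====
-- import string
--
-- _SYMBOLS = "}[&#(%"
--
-- def _classify(c: str) -> str:
--     """Map a character to its class label: U/L/D/S, or O for anything else."""
--     if c in string.ascii_uppercase:
--         return "U"
--     if c in string.ascii_lowercase:
--         return "L"
--     if c in string.digits:
--         return "D"
--     if c in _SYMBOLS:
--         return "S"
--     return "O"
--
-- def validate_save_code(code: str) -> bool:
--     """Basic structural validation of a save code (category-set version)."""
--     parts = code.split("-")
--     if len(parts) != 8:
--         return False
--     random_seq = parts[7]
--     if len(random_seq) != 6:
--         return False
--     cats = {_classify(c) for c in random_seq}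
--     return {"U", "L", "D", "S"} <= cats
-- ===== Notes on version B (the rewrite author's own statement) =====
-- stated objective: alternative
-- what changed: Instead of four existential any() scans over the suffix, each character is classified once into a class label (U/L/D/S/O), the labels are collected into a set, and the result is a subset test {U,L,D,S} <= cats.
import Mathlib
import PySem

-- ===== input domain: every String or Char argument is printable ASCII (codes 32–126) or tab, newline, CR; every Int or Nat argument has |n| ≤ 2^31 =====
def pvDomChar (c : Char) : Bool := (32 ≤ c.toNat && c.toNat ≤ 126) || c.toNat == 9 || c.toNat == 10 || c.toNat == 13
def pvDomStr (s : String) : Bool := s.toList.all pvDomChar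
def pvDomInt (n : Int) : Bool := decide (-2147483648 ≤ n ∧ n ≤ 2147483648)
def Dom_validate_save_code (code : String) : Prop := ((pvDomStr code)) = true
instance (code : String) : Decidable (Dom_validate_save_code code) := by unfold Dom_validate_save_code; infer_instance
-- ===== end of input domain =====

-- ===== PORT A =====
-- B replaces A's four any() scans with one classification pass into a set of class labels and a subset test (alternative structure, same result)
def upperChars : List Char := "ABCDEFGHIJKLMNOPQRSTUVWXYZ".toList
def lowerChars : List Char := "abcdefghijklmnopqrstuvwxyz".toList
def digitChars : List Char := "0123456789".toList
def symbolChars : List Char := "}[&#(%".toList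

def validate_save_code (code : String) : Bool :=
  match PySem.Str.split? code "-" with
  | none => false  -- unreachable: the separator "-" is nonempty
  | some parts =>
  if parts.length ≠ 8 then false
  else
    match PySem.List.pyGet? parts 7 with
    | none => false
    | some random_seq =>
      if PySem.Str.len random_seq ≠ 6 then false
      else
        let cs := random_seq.toList
        let has_upper := cs.any (fun c => upperChars.contains c)
        let has_lower := cs.any (fun c => lowerChars.contains c)
        let has_digit := cs.any (fun c => digitChars.contains c)
        let has_symbol := cs.any (fun c => symbolChars.contains c)
        has_upper && has_lower && has_digit && has_symbol

-- ===== PORT B =====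
def classify (c : Char) : String :=
  if upperChars.contains c then "U"
  else if lowerChars.contains c then "L"
  else if digitChars.contains c then "D"
  else if symbolChars.contains c then "S"
  else "O"

def validate_save_code_alt (code : String) : Bool :=
  match PySem.Str.split? code "-" with
  | none => false  -- unreachable: the separator "-" is nonempty
  | some parts =>
  if parts.length ≠ 8 then false
  else
    match PySem.List.pyGet? parts 7 with
    | none => false
    | some random_seq =>
      if PySem.Str.len random_seq ≠ 6 then false
      else
        let cats : PySem.Set String := PySem.Set.ofList (random_seq.toList.map classify)
        PySem.Set.issubset (PySem.Set.ofList ["U", "L", "D", "S"]) cats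

-- ===== PRECONDITION & SPEC =====
def Spec_validate_save_code (code : String) (out : Bool) : Prop := out = validate_save_code_alt code
instance (code : String) (out : Bool) : Decidable (Spec_validate_save_code code out) := by unfold Spec_validate_save_code; infer_instance

-- ===== CLAIM =====
def Claim_equal_validate_save_code : Prop := ∀ (code : String), Dom_validate_save_code code → Spec_validate_save_code code (validate_save_code code)

-- ===== LEMMAS AND PROOFS =====
theorem notmem_of_disjoint {xs ys : List Char} (hd : xs.all (fun c => !ys.contains c) = true)
    {c : Char} (hc : c ∈ xs) : c ∉ ys := by
  simp only [List.all_eq_true, Bool.not_eq_eq_eq_not, Bool.not_true] at hd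
  simpa using hd c hc

theorem classify_eq_U (c : Char) : classify c = "U" ↔ upperChars.contains c = true := by
  unfold classify; split_ifs with h1 h2 h3 h4 <;> simp_all

theorem classify_eq_L (c : Char) : classify c = "L" ↔ lowerChars.contains c = true := by
  unfold classify; split_ifs with h1 h2 h3 h4 <;> simp_all
  exact notmem_of_disjoint (by decide) h1

theorem classify_eq_D (c : Char) : classify c = "D" ↔ digitChars.contains c = true := by
  unfold classify; split_ifs with h1 h2 h3 h4 <;> simp_all
  · exact notmem_of_disjoint (by decide) h1
  · exact notmem_of_disjoint (by decide) h2

theorem classify_eq_S (c : Char) : classify c = "S" ↔ symbolChars.contains c = true := by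
  unfold classify; split_ifs with h1 h2 h3 h4 <;> simp_all
  · exact notmem_of_disjoint (by decide) h1
  · exact notmem_of_disjoint (by decide) h2
  · exact notmem_of_disjoint (by decide) h3

theorem subset_eq_anys (cs : List Char) :
    PySem.Set.issubset (PySem.Set.ofList ["U", "L", "D", "S"]) (PySem.Set.ofList (cs.map classify))
      = ((cs.any fun c => upperChars.contains c) && (cs.any fun c => lowerChars.contains c) &&
         (cs.any fun c => digitChars.contains c) && (cs.any fun c => symbolChars.contains c)) := by
  rw [Bool.eq_iff_iff, PySem.Set.issubset_iff]
  simp only [PySem.Set.mem_ofList, List.mem_map, List.any_eq_true, Bool.and_eq_true,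
    List.mem_cons, List.not_mem_nil, or_false, forall_eq_or_imp, forall_eq]
  constructor
  · rintro ⟨⟨c1, h1, e1⟩, ⟨c2, h2, e2⟩, ⟨c3, h3, e3⟩, ⟨c4, h4, e4⟩⟩
    exact ⟨⟨⟨⟨c1, h1, (classify_eq_U c1).mp e1⟩, ⟨c2, h2, (classify_eq_L c2).mp e2⟩⟩,
      ⟨c3, h3, (classify_eq_D c3).mp e3⟩⟩, ⟨c4, h4, (classify_eq_S c4).mp e4⟩⟩
  · rintro ⟨⟨⟨⟨c1, h1, e1⟩, ⟨c2, h2, e2⟩⟩, ⟨c3, h3, e3⟩⟩, ⟨c4, h4, e4⟩⟩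
    exact ⟨⟨c1, h1, (classify_eq_U c1).mpr e1⟩, ⟨c2, h2, (classify_eq_L c2).mpr e2⟩,
      ⟨c3, h3, (classify_eq_D c3).mpr e3⟩, ⟨c4, h4, (classify_eq_S c4).mpr e4⟩⟩

-- ===== VERDICT =====
theorem validate_save_code_spec : Claim_equal_validate_save_code := by
  intro code _
  unfold Spec_validate_save_code validate_save_code validate_save_code_alt
  cases hs : PySem.Str.split? code "-" with
  | none => rfl
  | some parts =>
    simp only []
    split_ifs with h1
    · rfl
    · cases h : PySem.List.pyGet? parts 7 with
      | none => rfl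
      | some rs =>
        simp only []
        split_ifs with h2
        · rfl
        · simp only [subset_eq_anys, Bool.and_assoc]
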